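-- pv_equiv track=rewrite | github.com/adamrfox/mt_filegen | mt_filegen.py | calculate_total_dirs
-- ===== SOURCE A (Python) =====
-- import copy
--
-- def calculate_total_dirs (ctd_depth):
--     total = 1
--     ct_depth = copy.deepcopy(ctd_depth)
--     while len(ct_depth) > 0:
--         p = 1;
--         for x in range(len(ct_depth)):
--             p *= int(ct_depth[x])
--         total += p
--         ct_depth.pop()
--     return (total)
-- ===== SOURCE B (Python) =====
-- def calculate_total_dirs(ctd_depth):
--     total = 1
--     p = 1
--     for x in ctd_depth:
--         p *= int(x)
--         total += p
--     return total
-- ===== Notes on version B (the rewrite author's own statement) =====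
-- stated objective: faster
-- what changed: replaced the recompute-the-whole-product-then-pop quadratic loop (and the deepcopy) by a single pass that maintains a running prefix product and adds it to the total at each element
import Mathlib
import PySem

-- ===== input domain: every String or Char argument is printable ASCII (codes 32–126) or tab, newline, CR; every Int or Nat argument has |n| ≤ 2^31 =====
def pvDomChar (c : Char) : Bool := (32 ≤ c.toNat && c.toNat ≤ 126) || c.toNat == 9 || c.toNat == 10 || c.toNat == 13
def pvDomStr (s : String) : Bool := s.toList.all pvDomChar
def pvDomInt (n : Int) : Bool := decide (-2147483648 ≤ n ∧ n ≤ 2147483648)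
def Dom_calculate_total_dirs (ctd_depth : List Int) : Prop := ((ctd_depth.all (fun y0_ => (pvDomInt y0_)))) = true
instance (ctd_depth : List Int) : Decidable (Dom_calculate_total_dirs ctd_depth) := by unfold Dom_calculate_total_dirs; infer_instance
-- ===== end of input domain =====

-- B replaces A's recompute-whole-product-then-pop O(n^2) loop by a single O(n) pass
-- keeping a running prefix product; same return value, and A never mutates its argument
-- (it deepcopies first).

-- ===== PORT A =====
-- the while loop: recompute the product of the whole current list, add it, pop the last element
def ctdLoop (ct_depth : List Int) (total : Int) : Int :=
  if ct_depth.length > 0 then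
    -- p = 1; for x in range(len(ct_depth)): p *= int(ct_depth[x])
    ctdLoop ct_depth.dropLast
      (total + (List.range ct_depth.length).foldl (fun p k => p * ct_depth.getD k 0) 1)
  else total
termination_by ct_depth.length
decreasing_by simp [List.length_dropLast]; omega

def calculate_total_dirs (ctd_depth : List Int) : Int :=
  ctdLoop ctd_depth 1

-- ===== PORT B =====
-- single pass: p *= x; total += p
def calculate_total_dirs_alt (ctd_depth : List Int) : Int :=
  (ctd_depth.foldl (fun tp x => (tp.1 + tp.2 * x, tp.2 * x)) (1, 1)).1

-- ===== PRECONDITION & SPEC =====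
def Spec_calculate_total_dirs (ctd_depth : List Int) (out : Int) : Prop := out = calculate_total_dirs_alt ctd_depth
instance (ctd_depth : List Int) (out : Int) : Decidable (Spec_calculate_total_dirs ctd_depth out) := by unfold Spec_calculate_total_dirs; infer_instance

-- ===== CLAIM (what is proved, stated in full; the proofs are below) =====
def Claim_equal_calculate_total_dirs : Prop := ∀ (ctd_depth : List Int), Dom_calculate_total_dirs ctd_depth → Spec_calculate_total_dirs ctd_depth (calculate_total_dirs ctd_depth)

-- ===== LEMMAS AND PROOFS =====

-- sum of the products of the nonempty prefixes
def spp : List Int → Int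
  | [] => 0
  | x :: xs => x + x * spp xs

theorem foldl_range_getD_prod (l : List Int) (a : Int) :
    (List.range l.length).foldl (fun p k => p * l.getD k 0) a = a * l.prod := by
  induction l generalizing a with
  | nil => simp
  | cons x xs ih =>
    rw [List.length_cons, List.range_succ_eq_map]
    simp only [List.foldl_cons, List.foldl_map, List.getD_cons_zero, List.getD_cons_succ]
    rw [ih (a * x), List.prod_cons]
    ring

theorem spp_dropLast (l : List Int) (h : l ≠ []) :
    spp l = l.prod + spp l.dropLast := by
  induction l with
  | nil => simp at h
  | cons x xs ih =>
    cases xs with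
    | nil => simp [spp]
    | cons y ys =>
      have h' : (y :: ys) ≠ [] := by simp
      rw [show spp (x :: y :: ys) = x + x * spp (y :: ys) from rfl, ih h',
          List.dropLast_cons_of_ne_nil h',
          show spp (x :: (y :: ys).dropLast) = x + x * spp ((y :: ys).dropLast) from rfl,
          List.prod_cons, List.prod_cons, List.prod_cons]
      ring

theorem ctdLoop_eq (l : List Int) (t : Int) : ctdLoop l t = t + spp l := by
  induction hn : l.length generalizing l t with
  | zero =>
    have : l = [] := List.length_eq_zero_iff.mp hn
    subst this
    simp [ctdLoop, spp]
  | succ n ih =>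
    have hne : l ≠ [] := by intro h; subst h; simp at hn
    rw [ctdLoop]
    have hlen : l.length > 0 := by omega
    simp only [if_pos hlen]
    rw [foldl_range_getD_prod, one_mul,
        ih l.dropLast _ (by simp [List.length_dropLast]; omega),
        spp_dropLast l hne]
    ring

theorem alt_foldl (l : List Int) (t p : Int) :
    (l.foldl (fun tp x => (tp.1 + tp.2 * x, tp.2 * x)) (t, p)).1 = t + p * spp l := by
  induction l generalizing t p with
  | nil => simp [spp]
  | cons x xs ih =>
    simp only [List.foldl_cons, spp]
    rw [ih]
    ring

-- ===== VERDICT (by name: the statement is the Claim_ definition above) =====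
theorem calculate_total_dirs_spec : Claim_equal_calculate_total_dirs := by
  intro l _
  unfold Spec_calculate_total_dirs calculate_total_dirs calculate_total_dirs_alt
  rw [ctdLoop_eq, alt_foldl]
  ring
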